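-- pv_equiv track=rewrite | github.com/minufy/tet_minu_bot | utils.py | grid_to_bitgrid
-- ===== SOURCE A (Python) =====
-- def grid_to_bitgrid(grid, empty=" "):
--     bitgrid = []
--     for row in grid:
--         b = 0
--         for x, cell in enumerate(row):
--             if cell != empty:
--                 b |= (1<<x)
--         bitgrid.append(b)
--     return bitgrid
-- ===== SOURCE B (Python) =====
-- def grid_to_bitgrid(grid, empty=" "):
--     def row_bits(row):
--         b = 0
--         for cell in reversed(row):
--             b = b * 2 + (cell != empty)
--         return b
--     return [row_bits(row) for row in grid]
-- ===== Notes on version B (the rewrite author's own statement) =====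
-- stated objective: alternative
-- what changed: Replaces per-cell bitwise-OR accumulation with enumerate-indexed shifts by a Horner evaluation over the reversed row (b = 2*b + bit), so no indices, shifts or OR are needed.
import Mathlib
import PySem

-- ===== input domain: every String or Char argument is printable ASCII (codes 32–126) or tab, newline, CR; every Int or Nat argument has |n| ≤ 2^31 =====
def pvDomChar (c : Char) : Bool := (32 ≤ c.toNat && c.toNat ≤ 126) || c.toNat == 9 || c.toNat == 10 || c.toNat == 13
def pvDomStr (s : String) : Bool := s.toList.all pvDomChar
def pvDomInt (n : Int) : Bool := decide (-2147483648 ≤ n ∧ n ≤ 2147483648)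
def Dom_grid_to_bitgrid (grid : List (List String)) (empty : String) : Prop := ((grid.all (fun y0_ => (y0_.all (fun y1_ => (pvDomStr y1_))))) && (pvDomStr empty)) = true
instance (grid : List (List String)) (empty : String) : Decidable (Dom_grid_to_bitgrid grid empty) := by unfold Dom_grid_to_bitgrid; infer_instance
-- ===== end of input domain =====

-- ===== PORT A =====
-- Port of A: per row, index-enumerated per-cell bitwise OR of 1 <<< x.
-- (enumerate indices are ≥ 0, so '.toNat' on the index is exact for Python's 1 << x.)
def grid_to_bitgrid (grid : List (List String)) (empty : String) : List Int :=
  grid.foldl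
    (fun bitgrid row =>
      bitgrid ++ [(PySem.List.enumerate row).foldl
        (fun b xc => if xc.2 ≠ empty then PySem.Int.bor b (1 <<< xc.1.toNat) else b) 0])
    []

-- ===== PORT B =====
-- Port of B: Horner evaluation b = 2*b + bit over the reversed row; map over the grid.
def pvRowBits (empty : String) (row : List String) : Int :=
  row.reverse.foldl (fun b cell => b * 2 + (if cell ≠ empty then 1 else 0)) 0

def grid_to_bitgrid_alt (grid : List (List String)) (empty : String) : List Int :=
  grid.map (pvRowBits empty)

-- ===== PRECONDITION & SPEC =====
def Spec_grid_to_bitgrid (grid : List (List String)) (empty : String) (out : List Int) : Prop := out = grid_to_bitgrid_alt grid empty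
instance (grid : List (List String)) (empty : String) (out : List Int) : Decidable (Spec_grid_to_bitgrid grid empty out) := by unfold Spec_grid_to_bitgrid; infer_instance

-- ===== CLAIM (what is proved, stated in full; the proofs are below) =====
def Claim_equal_grid_to_bitgrid : Prop := ∀ (grid : List (List String)) (empty : String), Dom_grid_to_bitgrid grid empty → Spec_grid_to_bitgrid grid empty (grid_to_bitgrid grid empty)

-- ===== LEMMAS AND PROOFS =====

-- Setting a bit above all bits of m is addition of that power of two.
theorem pv_lor_pow_of_lt : ∀ (i m : Nat), m < 2^i → m ||| 2^i = m + 2^i := by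
  intro i
  induction i with
  | zero => intro m h; interval_cases m; decide
  | succ i ih =>
    intro m h
    have hq : m/2 < 2^i := by have := Nat.pow_succ 2 i; omega
    have key := ih (m/2) hq
    rcases Nat.mod_two_eq_zero_or_one m with hr | hr
    · have hm : m = Nat.bit false (m/2) := by simp [Nat.bit]; omega
      have h2 : 2^(i+1) = Nat.bit false (2^i) := by simp [Nat.bit]; ring
      rw [hm, h2, Nat.lor_bit, key]
      simp [Nat.bit]; omega
    · have hm : m = Nat.bit true (m/2) := by simp [Nat.bit]; omega
      have h2 : 2^(i+1) = Nat.bit false (2^i) := by simp [Nat.bit]; ring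
      rw [hm, h2, Nat.lor_bit, key]
      simp [Nat.bit]
      ring_nf

-- foldr form of B's per-row value (head of the row is the least-significant bit).
def pvH (empty : String) (row : List String) : Int :=
  row.foldr (fun cell acc => acc * 2 + (if cell ≠ empty then 1 else 0)) 0

theorem pvRowBits_eq_H (empty : String) (row : List String) :
    pvRowBits empty row = pvH empty row := by
  unfold pvRowBits pvH
  rw [List.foldl_reverse]

-- A's inner loop, started at index k with accumulator b (0 ≤ b < 2^k),
-- computes b + 2^k * (B's Horner value of the row).
theorem pv_inner (empty : String) : ∀ (row : List String) (k : Nat) (b : Int),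
    0 ≤ b → b < 2 ^ k →
    (PySem.List.enumerate row (k : Int)).foldl
        (fun b xc => if xc.2 ≠ empty then PySem.Int.bor b (1 <<< xc.1.toNat) else b) b
      = b + 2 ^ k * pvH empty row := by
  intro row
  induction row with
  | nil => intro k b h0 h1; simp [PySem.List.enumerate, pvH]
  | cons c t ih =>
    intro k b h0 h1
    have hcast : ((k : Int) + 1) = ((k + 1 : Nat) : Int) := by push_cast; ring
    simp only [PySem.List.enumerate, List.foldl_cons, hcast]
    by_cases hc : c ≠ empty
    · have htn : ((k : Int)).toNat = k := by omega
      have hb : PySem.Int.bor b (1 <<< k) = b + 2 ^ k := by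
        have hbnat : b = ((b.toNat : Nat) : Int) := by omega
        have hshift : (1 <<< k : Nat) = 2 ^ k := by
          rw [Nat.shiftLeft_eq]; ring
        rw [hbnat, hshift, PySem.Int.bor_natCast]
        have hlt : b.toNat < 2 ^ k := by
          have : ((2:Int) ^ k) = ((2 ^ k : Nat) : Int) := by push_cast; ring
          omega
        rw [pv_lor_pow_of_lt k b.toNat hlt]
        push_cast; omega
      rw [if_pos hc, htn, hb]
      rw [ih (k + 1) (b + 2 ^ k) (by positivity) (by rw [pow_succ]; omega)]
      have : pvH empty (c :: t) = pvH empty t * 2 + 1 := by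
        simp only [pvH, List.foldr, if_pos hc]
      rw [this, pow_succ]; ring
    · rw [if_neg hc]
      rw [ih (k + 1) b h0 (by rw [pow_succ]; omega)]
      have : pvH empty (c :: t) = pvH empty t * 2 + 0 := by
        simp only [pvH, List.foldr, if_neg hc]
      rw [this, pow_succ]; ring

theorem pv_row (empty : String) (row : List String) :
    (PySem.List.enumerate row).foldl
        (fun b xc => if xc.2 ≠ empty then PySem.Int.bor b (1 <<< xc.1.toNat) else b) 0
      = pvRowBits empty row := by
  have h := pv_inner empty row 0 0 le_rfl (by norm_num)
  simpa [pvRowBits_eq_H] using h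

-- ===== VERDICT (by name: the statement is the Claim_ definition above) =====
theorem grid_to_bitgrid_spec : Claim_equal_grid_to_bitgrid := by
  intro grid empty _
  unfold Spec_grid_to_bitgrid grid_to_bitgrid grid_to_bitgrid_alt
  rw [PySem.List.foldl_append_singleton_eq_map]
  exact List.map_congr_left (fun row _ => pv_row empty row)
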